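-- pv_equiv track=rewrite | github.com/ChangTng1/Shopee | Shopee_Code.py | weld
-- ===== SOURCE A (Python) =====
-- import itertools
--
-- def weld(bar):
--     possible = []
--     for i in range(len(bar)):
--         this_bar = bar[i]
--         other_bar = bar[:i] + bar[i+1:]
--         for j in range(1, len(other_bar)+1):
--             j_comb = list(itertools.combinations(other_bar, j))
--             for this_set in j_comb:
--
--                 if sum(list(this_set)) == this_bar:
--                     possible.append(this_bar)
--     if possible == []:
--         return 0
--     else:
--         return max(possible)
-- ===== SOURCE B (Python) =====
-- def weld(bar):
--     best = None
--     for i, t in enumerate(bar):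
--         others = bar[:i] + bar[i+1:]
--         reach = set()
--         for x in others:
--             reach = reach | {s + x for s in reach} | {x}
--         if t in reach and (best is None or t > best):
--             best = t
--     return 0 if best is None else best
-- ===== Notes on version B (the rewrite author's own statement) =====
-- stated objective: faster
-- what changed: Replaces the per-bar enumeration of all combinations of every size with a per-bar subset-sum DP over the set of reachable sums (deduplicated), tracking a running maximum instead of collecting a list of matches.
import Mathlib
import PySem

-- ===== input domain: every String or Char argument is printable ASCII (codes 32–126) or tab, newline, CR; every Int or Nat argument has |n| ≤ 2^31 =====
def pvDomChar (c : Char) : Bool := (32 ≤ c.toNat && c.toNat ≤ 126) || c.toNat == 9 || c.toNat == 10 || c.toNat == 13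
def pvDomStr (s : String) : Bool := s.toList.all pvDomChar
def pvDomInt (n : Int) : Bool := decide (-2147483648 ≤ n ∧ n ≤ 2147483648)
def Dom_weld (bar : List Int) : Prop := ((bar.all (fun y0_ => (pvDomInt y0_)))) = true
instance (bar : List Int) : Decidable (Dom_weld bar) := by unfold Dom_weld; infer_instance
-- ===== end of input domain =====

-- B replaces A's enumeration of all subsets of the other bars with a per-bar
-- subset-sum DP over the deduplicated set of reachable sums, keeping a running maximum.

-- ===== PORT A =====
def weld (bar : List Int) : Int :=
  let possible : List Int :=
    (PySem.List.pyRange 0 bar.length 1).foldl (fun possible i =>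
      let this_bar := PySem.List.pyGetD bar i 0
      let other_bar := PySem.List.slice bar none (some i) ++ PySem.List.slice bar (some (i + 1)) none
      (PySem.List.pyRange 1 (other_bar.length + 1) 1).foldl (fun possible j =>
        (PySem.List.combinations other_bar j.toNat).foldl (fun possible this_set =>
          if this_set.sum = this_bar then possible ++ [this_bar] else possible) possible) possible) []
  if possible = [] then 0
  else (PySem.List.max? possible (fun x => x)).getD 0

-- ===== PORT B =====
-- reach = reach | {s + x for s in reach} | {x}
def weldStep (reach : PySem.Set Int) (x : Int) : PySem.Set Int :=
  PySem.Set.union (PySem.Set.union reach (PySem.Set.ofList (reach.map (fun s => s + x)))) [x]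

def weld_alt (bar : List Int) : Int :=
  let best : Option Int :=
    (PySem.List.enumerate bar).foldl (fun (best : Option Int) it =>
      let t := it.2
      let others := PySem.List.slice bar none (some it.1) ++ PySem.List.slice bar (some (it.1 + 1)) none
      let reach := others.foldl weldStep PySem.Set.empty
      if PySem.Set.contains reach t && (match best with | none => true | some b => decide (b < t)) then some t
      else best) none
  match best with
  | none => 0
  | some b => b

-- ===== PRECONDITION & SPEC =====
def Spec_weld (bar : List Int) (out : Int) : Prop := out = weld_alt bar
instance (bar : List Int) (out : Int) : Decidable (Spec_weld bar out) := by unfold Spec_weld; infer_instance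

-- ===== CLAIM (what is proved, stated in full; the proofs are below) =====
def Claim_equal_weld : Prop := ∀ (bar : List Int), Dom_weld bar → Spec_weld bar (weld bar)

-- ===== LEMMAS AND PROOFS =====

-- the other bars, for index k
def pvOthers (bar : List Int) (k : Nat) : List Int := bar.take k ++ bar.drop (k + 1)

-- t is the sum of a nonempty subsequence of l
def pvHasSub (t : Int) (l : List Int) : Prop := ∃ s : List Int, s.Sublist l ∧ s ≠ [] ∧ s.sum = t

-- x is a qualifying bar value: equal to the sum of a nonempty subset of the other bars
def pvQual (bar : List Int) (x : Int) : Prop := ∃ k : Nat, bar[k]? = some x ∧ pvHasSub x (pvOthers bar k)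

-- ---- B side: the reach set ----
theorem mem_weldStep (r : PySem.Set Int) (x t : Int) :
    t ∈ weldStep r x ↔ t ∈ r ∨ (∃ u ∈ r, u + x = t) ∨ t = x := by
  simp [weldStep, PySem.Set.mem_union, PySem.Set.mem_ofList]
  exact or_assoc

theorem mem_foldl_weldStep (l : List Int) (r : PySem.Set Int) (t : Int) :
    t ∈ l.foldl weldStep r ↔
      t ∈ r ∨ ∃ s : List Int, s.Sublist l ∧ s ≠ [] ∧ (s.sum = t ∨ ∃ u ∈ r, u + s.sum = t) := by
  induction l generalizing r with
  | nil =>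
    simp only [List.foldl_nil, List.sublist_nil]
    constructor
    · exact fun h => Or.inl h
    · rintro (h | ⟨s, hs, hne, _⟩)
      · exact h
      · exact absurd hs hne
  | cons y ys ih =>
    rw [List.foldl_cons, ih]
    constructor
    · rintro (h | ⟨s, hs, hne, h⟩)
      · rcases (mem_weldStep r y t).mp h with h | ⟨u, hu, hux⟩ | heq
        · exact Or.inl h
        · exact Or.inr ⟨[y], (List.sublist_cons_iff).mpr (Or.inr ⟨[], rfl, List.nil_sublist ys⟩),
            by simp, Or.inr ⟨u, hu, by simpa using hux⟩⟩
        · exact Or.inr ⟨[y], (List.sublist_cons_iff).mpr (Or.inr ⟨[], rfl, List.nil_sublist ys⟩),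
            by simp, Or.inl (by simp; omega)⟩
      · rcases h with h | ⟨u, hu, hut⟩
        · exact Or.inr ⟨s, hs.cons y, hne, Or.inl h⟩
        · rcases (mem_weldStep r y u).mp hu with h | ⟨v, hv, hvx⟩ | heq
          · exact Or.inr ⟨s, hs.cons y, hne, Or.inr ⟨u, h, hut⟩⟩
          · exact Or.inr ⟨y :: s, (List.sublist_cons_iff).mpr (Or.inr ⟨s, rfl, hs⟩),
              by simp, Or.inr ⟨v, hv, by simp [List.sum_cons]; omega⟩⟩
          · exact Or.inr ⟨y :: s, (List.sublist_cons_iff).mpr (Or.inr ⟨s, rfl, hs⟩),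
              by simp, Or.inl (by simp [List.sum_cons]; omega)⟩
    · rintro (h | ⟨s, hs, hne, h⟩)
      · exact Or.inl ((mem_weldStep r y t).mpr (Or.inl h))
      · rcases (List.sublist_cons_iff).mp hs with hs' | ⟨s', rfl, hs'⟩
        · rcases h with h | ⟨u, hu, hut⟩
          · exact Or.inr ⟨s, hs', hne, Or.inl h⟩
          · exact Or.inr ⟨s, hs', hne, Or.inr ⟨u, (mem_weldStep r y u).mpr (Or.inl hu), hut⟩⟩
        · rcases eq_or_ne s' [] with rfl | hne'
          · rcases h with h | ⟨u, hu, hut⟩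
            · exact Or.inl ((mem_weldStep r y t).mpr (Or.inr (Or.inr (by simpa using h.symm))))
            · exact Or.inl ((mem_weldStep r y t).mpr (Or.inr (Or.inl ⟨u, hu, by simpa using hut⟩)))
          · rcases h with h | ⟨u, hu, hut⟩
            · exact Or.inr ⟨s', hs', hne', Or.inr ⟨y, (mem_weldStep r y y).mpr (Or.inr (Or.inr rfl)),
                by simp [List.sum_cons] at h; omega⟩⟩
            · exact Or.inr ⟨s', hs', hne', Or.inr ⟨u + y,
                (mem_weldStep r y (u + y)).mpr (Or.inr (Or.inl ⟨u, hu, rfl⟩)),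
                by simp [List.sum_cons] at hut; omega⟩⟩

theorem mem_reach (l : List Int) (t : Int) :
    t ∈ l.foldl weldStep PySem.Set.empty ↔ pvHasSub t l := by
  rw [mem_foldl_weldStep]
  simp [PySem.Set.empty, pvHasSub]

-- ---- shared: ranging over all nonempty subset sizes ----
theorem combos_iff (o : List Int) (t : Int) :
    (∃ j ∈ PySem.List.pyRange 1 ((o.length : Int) + 1) 1,
        ∃ c ∈ PySem.List.combinations o j.toNat, c.sum = t) ↔ pvHasSub t o := by
  constructor
  · rintro ⟨j, hj, c, hc, hsum⟩
    rw [PySem.List.mem_pyRange_one] at hj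
    rw [PySem.List.mem_combinations_iff] at hc
    refine ⟨c, hc.1, ?_, hsum⟩
    intro h
    subst h
    have := hc.2
    simp at this
    omega
  · rintro ⟨s, hs, hne, hsum⟩
    have h1 : 1 ≤ s.length := List.length_pos_iff.mpr hne
    have h2 : s.length ≤ o.length := hs.length_le
    refine ⟨(s.length : Int), ?_, s, ?_, hsum⟩
    · rw [PySem.List.mem_pyRange_one]
      omega
    · rw [PySem.List.mem_combinations_iff]
      exact ⟨hs, by simp⟩

-- ---- A side: characterization of `possible` ----
def pvT (bar : List Int) (k : Nat) : Int := bar.getD k 0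

def pvG (bar : List Int) (k : Nat) : List Int :=
  (PySem.List.pyRange 1 (((pvOthers bar k).length : Int) + 1) 1).flatMap (fun j =>
    ((PySem.List.combinations (pvOthers bar k) j.toNat).filter
      (fun c => decide (c.sum = pvT bar k))).map (fun _ => pvT bar k))

theorem others_slice (bar : List Int) (k : Nat) :
    PySem.List.slice bar none (some (k : Int)) ++ PySem.List.slice bar (some ((k : Int) + 1)) none
      = pvOthers bar k := by
  rw [PySem.List.slice_to_natCast]
  rw [show ((k : Int) + 1) = ((k + 1 : Nat) : Int) by push_cast; ring]
  rw [PySem.List.slice_from_natCast]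
  rfl

theorem possible_eq (bar : List Int) :
    (PySem.List.pyRange 0 bar.length 1).foldl (fun possible i =>
      let this_bar := PySem.List.pyGetD bar i 0
      let other_bar := PySem.List.slice bar none (some i) ++ PySem.List.slice bar (some (i + 1)) none
      (PySem.List.pyRange 1 (other_bar.length + 1) 1).foldl (fun possible j =>
        (PySem.List.combinations other_bar j.toNat).foldl (fun possible this_set =>
          if this_set.sum = this_bar then possible ++ [this_bar] else possible) possible) possible) ([] : List Int)
    = (List.range bar.length).flatMap (pvG bar) := by
  rw [PySem.List.pyRange_zero_nat, List.foldl_map]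
  rw [PySem.List.foldl_congr_mem (List.range bar.length) _
    (fun poss k => poss ++ pvG bar k) [] ?_]
  · rw [PySem.List.foldl_append_eq_flatMap, List.nil_append]
  · intro acc k hk
    simp only []
    rw [show PySem.List.pyGetD bar ((k : Nat) : Int) 0 = pvT bar k by
      simp [PySem.List.pyGetD_natCast, pvT]]
    rw [others_slice bar k]
    rw [PySem.List.foldl_congr_mem _ _
      (fun (poss : List Int) (j : Int) => poss ++
        ((PySem.List.combinations (pvOthers bar k) j.toNat).filter
          (fun c => decide (c.sum = pvT bar k))).map (fun _ => pvT bar k)) acc ?_]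
    · rw [PySem.List.foldl_append_eq_flatMap]
      rfl
    · intro acc2 j hj
      exact PySem.List.foldl_append_ite _ _ _ _

theorem mem_pvG (bar : List Int) (k : Nat) (x : Int) :
    x ∈ pvG bar k ↔ x = pvT bar k ∧ pvHasSub (pvT bar k) (pvOthers bar k) := by
  simp only [pvG, List.mem_flatMap, List.mem_map, List.mem_filter, decide_eq_true_eq]
  rw [← combos_iff]
  constructor
  · rintro ⟨j, hj, c, ⟨hc, hsum⟩, rfl⟩
    exact ⟨rfl, j, hj, c, hc, hsum⟩
  · rintro ⟨rfl, j, hj, c, hc, hsum⟩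
    exact ⟨j, hj, c, ⟨hc, hsum⟩, rfl⟩

-- ---- B side: the running maximum ----
def pvOmax (b : Option Int) (t : Int) : Option Int :=
  if (match b with | none => true | some b' => decide (b' < t)) then some t else b

theorem foldl_pvOmax_some (vs : List Int) (a : Int) :
    vs.foldl pvOmax (some a) = some (vs.foldl max a) := by
  induction vs generalizing a with
  | nil => rfl
  | cons v vs ih =>
    rw [List.foldl_cons, List.foldl_cons, ← ih]
    congr 1
    simp only [pvOmax]
    split_ifs with h
    · simp at h
      rw [max_eq_right h.le]
    · simp at h
      rw [max_eq_left h]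

theorem foldl_pvOmax_none (vs : List Int) :
    vs.foldl pvOmax none = match vs with | [] => none | v :: rest => some (rest.foldl max v) := by
  cases vs with
  | nil => rfl
  | cons v rest => rw [List.foldl_cons]; exact foldl_pvOmax_some rest v

theorem mem_enumerate_iff (bar : List Int) (s i x : Int) :
    (i, x) ∈ PySem.List.enumerate bar s ↔ ∃ k : Nat, i = s + (k : Int) ∧ bar[k]? = some x := by
  induction bar generalizing s with
  | nil => simp [PySem.List.enumerate_nil]
  | cons y l ih =>
    rw [PySem.List.enumerate_cons, List.mem_cons, ih]
    constructor
    · rintro (h | ⟨k, rfl, hk⟩)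
      · simp only [Prod.ext_iff] at h
        exact ⟨0, by simp [h.1], by simp [h.2]⟩
      · exact ⟨k + 1, by push_cast; omega, by simpa using hk⟩
    · rintro ⟨k, rfl, hk⟩
      cases k with
      | zero => simp at hk; simp [hk]
      | succ k => exact Or.inr ⟨k, by push_cast; omega, by simpa using hk⟩

-- B's qualification test for one enumerated pair
def pvCb (bar : List Int) (it : Int × Int) : Bool :=
  PySem.Set.contains
    ((PySem.List.slice bar none (some it.1) ++ PySem.List.slice bar (some (it.1 + 1)) none).foldl
      weldStep PySem.Set.empty) it.2

theorem weld_alt_eq (bar : List Int) :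
    weld_alt bar = match ((PySem.List.enumerate bar).filter (pvCb bar)).map (·.2) with
      | [] => 0 | v :: rest => rest.foldl max v := by
  unfold weld_alt
  simp only []
  rw [PySem.List.foldl_congr_mem (PySem.List.enumerate bar) _
    (fun (best : Option Int) it => if pvCb bar it then pvOmax best it.2 else best) none ?_]
  · rw [PySem.List.foldl_if_eq_foldl_filter]
    rw [show (fun (best : Option Int) (it : Int × Int) => pvOmax best it.2)
        = (fun (best : Option Int) (it : Int × Int) => pvOmax best ((·.2) it)) from rfl]
    rw [← List.foldl_map]
    rw [foldl_pvOmax_none]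
    cases ((PySem.List.enumerate bar).filter (pvCb bar)).map (·.2) with
    | nil => rfl
    | cons v rest => rfl
  · intro b it _
    simp only [pvCb, pvOmax]
    by_cases hA : PySem.Set.contains
        ((PySem.List.slice bar none (some it.1) ++
          PySem.List.slice bar (some (it.1 + 1)) none).foldl weldStep PySem.Set.empty) it.2
    all_goals
      simp only [PySem.Set.contains_iff, List.foldl_append, PySem.Set.empty] at hA
      simp [hA]

theorem mem_qualvals (bar : List Int) (x : Int) :
    x ∈ ((PySem.List.enumerate bar).filter (pvCb bar)).map (·.2) ↔ pvQual bar x := by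
  simp only [List.mem_map, List.mem_filter]
  constructor
  · rintro ⟨⟨i, v⟩, ⟨hmem, hcb⟩, rfl⟩
    rcases (mem_enumerate_iff bar 0 i v).mp hmem with ⟨k, rfl, hk⟩
    refine ⟨k, hk, ?_⟩
    simp only [pvCb] at hcb
    rw [show ((0 : Int) + (k : Int)) = (k : Int) by ring] at hcb
    rw [others_slice bar k] at hcb
    rw [PySem.Set.contains_iff] at hcb
    exact (mem_reach _ _).mp hcb
  · rintro ⟨k, hk, hsub⟩
    refine ⟨((k : Int), x), ⟨?_, ?_⟩, rfl⟩
    · exact (mem_enumerate_iff bar 0 (k : Int) x).mpr ⟨k, by ring, hk⟩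
    · simp only [pvCb]
      rw [others_slice bar k, PySem.Set.contains_iff]
      exact (mem_reach _ _).mpr hsub

-- ===== VERDICT (by name: the statement is the Claim_ definition above) =====
theorem weld_spec : Claim_equal_weld := by
  intro bar _
  unfold Spec_weld
  rw [weld_alt_eq]
  unfold weld
  simp only []
  rw [possible_eq]
  have hmem : ∀ x, x ∈ (List.range bar.length).flatMap (pvG bar) ↔
      x ∈ ((PySem.List.enumerate bar).filter (pvCb bar)).map (·.2) := by
    intro x
    rw [mem_qualvals]
    simp only [List.mem_flatMap, List.mem_range]
    constructor
    · rintro ⟨k, hk, hx⟩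
      rcases (mem_pvG bar k x).mp hx with ⟨rfl, hsub⟩
      refine ⟨k, ?_, hsub⟩
      show bar[k]? = some (bar.getD k 0)
      rw [List.getD_eq_getElem bar 0 hk, List.getElem?_eq_getElem hk]
    · rintro ⟨k, hk, hsub⟩
      rcases List.getElem?_eq_some_iff.mp hk with ⟨hlt, hval⟩
      have hx : x = pvT bar k := by
        show x = bar.getD k 0
        rw [List.getD_eq_getElem bar 0 hlt, hval]
      refine ⟨k, hlt, (mem_pvG bar k x).mpr ⟨hx, ?_⟩⟩
      rw [← hx]
      exact hsub
  cases hLv : (List.range bar.length).flatMap (pvG bar) with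
  | nil =>
    have hVnil : ((PySem.List.enumerate bar).filter (pvCb bar)).map (·.2) = [] := by
      rcases hV : ((PySem.List.enumerate bar).filter (pvCb bar)).map (·.2) with _ | ⟨v, rest⟩
      · exact hV
      · exfalso
        have : v ∈ (List.range bar.length).flatMap (pvG bar) :=
          (hmem v).mpr (by rw [hV]; exact List.mem_cons_self ..)
        rw [hLv] at this
        simp at this
    rw [hVnil]
    simp
  | cons h tl =>
    have hhV : h ∈ ((PySem.List.enumerate bar).filter (pvCb bar)).map (·.2) :=
      (hmem h).mp (by rw [hLv]; exact List.mem_cons_self ..)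
    rcases hVv : ((PySem.List.enumerate bar).filter (pvCb bar)).map (·.2) with _ | ⟨v, rest⟩
    · rw [hVv] at hhV; simp at hhV
    · rw [if_neg (by simp)]
      rw [PySem.List.max?_id_cons]
      simp only [Option.getD_some]
      have bA := PySem.List.le_foldl_max tl h
      have bB := PySem.List.le_foldl_max rest v
      have haL : tl.foldl max h ∈ h :: tl := by
        rcases PySem.List.foldl_max_mem tl h with h' | h'
        · rw [h']; exact List.mem_cons_self ..
        · exact List.mem_cons_of_mem _ h'
      have hbV : rest.foldl max v ∈ v :: rest := by
        rcases PySem.List.foldl_max_mem rest v with h' | h'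
        · rw [h']; exact List.mem_cons_self ..
        · exact List.mem_cons_of_mem _ h'
      have hab : tl.foldl max h ≤ rest.foldl max v := by
        have : tl.foldl max h ∈ v :: rest := by
          rw [← hVv]
          exact (hmem _).mp (by rw [hLv]; exact haL)
        rcases List.mem_cons.mp this with h' | h'
        · rw [h']; exact bB.1
        · exact bB.2 _ h'
      have hba : rest.foldl max v ≤ tl.foldl max h := by
        have : rest.foldl max v ∈ h :: tl := by
          rw [← hLv]
          exact (hmem _).mpr (by rw [hVv]; exact hbV)
        rcases List.mem_cons.mp this with h' | h'
        · rw [h']; exact bA.1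
        · exact bA.2 _ h'
      rw [hVv]
      exact le_antisymm hab hba
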